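-- pv_equiv track=rewrite | github.com/27DEBAPRIYA/BWU-Attendance-Summarizer | app.py | is_date_or_group
-- ===== SOURCE A (Python) =====
-- def is_date_or_group(value):
--     if value is None:
--         return False
--     val = str(value).lower()
--     return (
--         "group" in val or
--         any(c.isdigit() for c in val) and ('/' in val or '-' in val or ':' in val or val.count("-") >= 2)
--     )
-- ===== SOURCE B (Python) =====
-- def is_date_or_group(value):
--     if value is None:
--         return False
--     val = str(value).lower()
--     # single pass: KMP-style automaton for the pattern "group" (all its characters
--     # are distinct, so on mismatch the only viable restart is at 'g'), fused with
--     # two monotone flags for digits and separators; early exit on a full match.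
--     pat = "group"
--     k = 0
--     has_digit = False
--     has_sep = False
--     for c in val:
--         if c == pat[k]:
--             k += 1
--             if k == 5:
--                 return True
--         elif c == 'g':
--             k = 1
--         else:
--             k = 0
--         if c.isdigit():
--             has_digit = True
--         if c in "/-:":
--             has_sep = True
--     return has_digit and has_sep
-- ===== Notes on version B (the rewrite author's own statement) =====
-- stated objective: alternative
-- what changed: Replaced A's staged scans (substring 'group' test, any-digit scan, three separator membership tests and a dash count) by one single pass running a KMP-style string-matching automaton for 'group' (early return on a full match) fused with two monotone flags for digits and separators; the redundant dash-count disjunct disappears since it is subsumed by dash membership.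
import Mathlib
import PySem

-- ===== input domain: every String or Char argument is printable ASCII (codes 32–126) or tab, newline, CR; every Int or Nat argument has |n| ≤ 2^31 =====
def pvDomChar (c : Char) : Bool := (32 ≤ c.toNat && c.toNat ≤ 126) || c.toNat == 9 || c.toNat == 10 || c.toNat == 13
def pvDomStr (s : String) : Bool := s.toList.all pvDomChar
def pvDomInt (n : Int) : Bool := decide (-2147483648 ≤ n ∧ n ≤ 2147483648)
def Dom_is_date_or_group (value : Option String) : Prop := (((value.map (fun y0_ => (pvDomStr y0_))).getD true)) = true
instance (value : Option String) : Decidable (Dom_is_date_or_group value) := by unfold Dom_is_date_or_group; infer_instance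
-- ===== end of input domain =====

-- B replaces A's staged scans (substring test, any-digit, three membership tests, a count)
-- by a single pass running a KMP-style automaton for "group" fused with two monotone flags
-- (objective: alternative).


-- ===== PORT A =====
def is_date_or_group (value : Option String) : Bool :=
  match value with
  | none => false
  | some s =>
    let val := PySem.Str.lower s
    PySem.Str.isIn "group" val ||
      (val.toList.any (fun c => PySem.Chars.isdigit c) &&
        (PySem.Str.isIn "/" val || PySem.Str.isIn "-" val || PySem.Str.isIn ":" val ||
          decide (2 ≤ PySem.Str.count val "-")))

-- ===== PORT B =====
-- the pattern "group" as a character list (Source B's `pat`)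
def pvPat : List Char := ['g', 'r', 'o', 'u', 'p']

-- automaton transition of Source B's loop body: advance on a match of pat[k], else restart at 'g' or 0
def pvStep (k : Nat) (c : Char) : Nat :=
  if some c = pvPat[k]? then k + 1 else if c = 'g' then 1 else 0

-- Source B's for-loop: state k plus the two flags, early return on k = 5
def altScan : List Char → Nat → Bool → Bool → Bool
  | [], _, hd, hs => hd && hs
  | c :: cs, k, hd, hs =>
      let k' := pvStep k c
      if k' = 5 then true
      else altScan cs k'
        (if PySem.Chars.isdigit c then true else hd)
        (if PySem.Chars.isIn [c] ['/', '-', ':'] then true else hs)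

def is_date_or_group_alt (value : Option String) : Bool :=
  match value with
  | none => false
  | some s => altScan (PySem.Str.lower s).toList 0 false false

-- ===== PRECONDITION & SPEC =====
def Spec_is_date_or_group (value : Option String) (out : Bool) : Prop := out = is_date_or_group_alt value
instance (value : Option String) (out : Bool) : Decidable (Spec_is_date_or_group value out) := by unfold Spec_is_date_or_group; infer_instance

-- ===== CLAIM (what is proved, stated in full; the proofs are below) =====
def Claim_equal_is_date_or_group : Prop := ∀ (value : Option String), Dom_is_date_or_group value → Spec_is_date_or_group value (is_date_or_group value)

-- ===== LEMMAS AND PROOFS =====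

-- "reach k l": starting in automaton state k, the run over l hits state 5 at some point
def pvReach : Nat → List Char → Bool
  | _, [] => false
  | k, c :: cs => pvStep k c = 5 || pvReach (pvStep k c) cs

def pvRun : Nat → List Char → Nat
  | k, [] => k
  | k, c :: cs => pvRun (pvStep k c) cs

theorem altScan_eq (l : List Char) : ∀ (k : Nat) (hd hs : Bool),
    altScan l k hd hs =
      (pvReach k l ||
        ((hd || l.any (fun c => PySem.Chars.isdigit c)) &&
         (hs || l.any (fun c => PySem.Chars.isIn [c] ['/', '-', ':'])))) := by
  induction l with
  | nil => intro k hd hs; simp [altScan, pvReach]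
  | cons c cs ih =>
    intro k hd hs
    simp only [altScan, pvReach, List.any_cons]
    by_cases h5 : pvStep k c = 5
    · simp [h5]
    · simp only [ih, h5, decide_false, Bool.false_or]
      cases PySem.Chars.isdigit c <;> cases PySem.Chars.isIn [c] ['/', '-', ':'] <;>
        cases hd <;> cases hs <;> simp

theorem pvStep_suffix (k : Nat) (c : Char) (acc : List Char)
    (h : pvPat.take k <:+ acc) : pvPat.take (pvStep k c) <:+ acc ++ [c] := by
  unfold pvStep
  split
  · rename_i hm
    have hk : k < pvPat.length := by
      by_contra hk
      rw [List.getElem?_eq_none (by omega)] at hm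
      simp at hm
    have hc : pvPat[k] = c := by
      have := List.getElem?_eq_getElem hk
      rw [this] at hm; exact (Option.some_injective _ hm.symm)
    rw [List.take_add_one, List.getElem?_eq_getElem hk, hc]
    obtain ⟨u, hu⟩ := h
    exact ⟨u, by simp [← hu]⟩
  · split
    · rename_i hg
      subst hg
      exact ⟨acc, by simp [pvPat]⟩
    · exact ⟨acc ++ [c], by simp⟩

theorem pvReach_infix : ∀ (l : List Char) (k : Nat) (acc : List Char),
    pvPat.take k <:+ acc → pvReach k l = true → pvPat <:+: (acc ++ l) := by
  intro l
  induction l with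
  | nil => intro k acc _ h; simp [pvReach] at h
  | cons c cs ih =>
    intro k acc hsuf h
    have hstep := pvStep_suffix k c acc hsuf
    simp only [pvReach, Bool.or_eq_true, decide_eq_true_eq] at h
    rcases h with h5 | hrec
    · rw [h5] at hstep
      have hpat : pvPat <:+ acc ++ [c] := by simpa [pvPat] using hstep
      have : pvPat <:+: acc ++ [c] := hpat.isInfix
      refine this.trans ⟨[], cs, by simp⟩
    · have := ih (pvStep k c) (acc ++ [c]) hstep hrec
      simpa using this

theorem pvReach_append (a b : List Char) : ∀ k,
    pvReach k (a ++ b) = (pvReach k a || pvReach (pvRun k a) b) := by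
  induction a with
  | nil => intro k; simp [pvReach, pvRun]
  | cons c cs ih =>
    intro k
    simp only [List.cons_append, pvReach, pvRun, ih]
    cases decide (pvStep k c = 5) <;> simp

theorem pvStep_g (k : Nat) : pvStep k 'g' = 1 := by
  unfold pvStep
  match k with
  | 0 => decide
  | 1 => decide
  | 2 => decide
  | 3 => decide
  | 4 => decide
  | n + 5 =>
    have h : pvPat[n + 5]? = none := List.getElem?_eq_none (by simp [pvPat])
    simp [h]

theorem pvReach_pat (k : Nat) : pvReach k pvPat = true := by
  show pvReach k ('g' :: ['r', 'o', 'u', 'p']) = true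
  simp only [pvReach, pvStep_g]
  decide

theorem pvReach_iff (l : List Char) : pvReach 0 l = true ↔ pvPat <:+: l := by
  constructor
  · intro h
    simpa using pvReach_infix l 0 [] (by simp) h
  · rintro ⟨s, t, rfl⟩
    rw [show s ++ pvPat ++ t = s ++ (pvPat ++ t) by simp, pvReach_append,
        pvReach_append, pvReach_pat]
    simp

theorem isIn_singleton_iff_mem (c : Char) (l : List Char) :
    PySem.Chars.isIn [c] l = true ↔ c ∈ l := by
  rw [PySem.Chars.isIn_iff_infix]
  constructor
  · intro h
    exact (List.singleton_sublist).mp h.sublist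
  · intro h
    obtain ⟨s, t, rfl⟩ := List.append_of_mem h
    exact ⟨s, t, by simp⟩

theorem any_sep_eq (l : List Char) :
    l.any (fun c => PySem.Chars.isIn [c] ['/', '-', ':']) =
      (PySem.Chars.isIn ['/'] l || PySem.Chars.isIn ['-'] l || PySem.Chars.isIn [':'] l) := by
  rw [Bool.eq_iff_iff]
  simp only [Bool.or_eq_true, List.any_eq_true, isIn_singleton_iff_mem]
  constructor
  · rintro ⟨c, hc, hm⟩
    simp only [List.mem_cons, List.not_mem_nil, or_false] at hm
    rcases hm with rfl | rfl | rfl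
    · exact Or.inl (Or.inl hc)
    · exact Or.inl (Or.inr hc)
    · exact Or.inr hc
  · rintro ((h | h) | h)
    · exact ⟨'/', h, by simp⟩
    · exact ⟨'-', h, by simp⟩
    · exact ⟨':', h, by simp⟩

theorem countGo_infix (sub : List Char) :
    ∀ (fuel : Nat) (l : List Char) (acc : Nat),
      acc < PySem.Chars.count.go sub fuel l acc → sub <:+: l := by
  intro fuel
  induction fuel with
  | zero => intro l acc h; simp [PySem.Chars.count.go] at h
  | succ n ih =>
    intro l acc h
    cases l with
    | nil => simp [PySem.Chars.count.go] at h
    | cons x xs =>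
      by_cases hp : sub.isPrefixOf (x :: xs) = true
      · exact ((List.isPrefixOf_iff_prefix).mp hp).isInfix
      · simp only [PySem.Chars.count.go, hp] at h
        exact (ih xs acc h).trans (List.infix_cons (List.infix_refl xs))

theorem count_two_isIn (l : List Char) (h : 2 ≤ PySem.Chars.count l ['-']) :
    PySem.Chars.isIn ['-'] l = true := by
  rw [PySem.Chars.isIn_iff_infix]
  have : PySem.Chars.count l ['-'] = PySem.Chars.count.go ['-'] l.length l 0 := by
    simp [PySem.Chars.count]
  rw [this] at h
  exact countGo_infix ['-'] l.length l 0 (by omega)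

theorem core_chars (l : List Char) :
    (PySem.Chars.isIn pvPat l ||
      (l.any (fun c => PySem.Chars.isdigit c) &&
        (PySem.Chars.isIn ['/'] l || PySem.Chars.isIn ['-'] l || PySem.Chars.isIn [':'] l ||
          decide (2 ≤ PySem.Chars.count l ['-'])))) =
    altScan l 0 false false := by
  rw [altScan_eq, any_sep_eq]
  have hre : pvReach 0 l = PySem.Chars.isIn pvPat l := by
    rw [Bool.eq_iff_iff, pvReach_iff, ← PySem.Chars.isIn_iff_infix]
  rw [hre]
  by_cases hg : PySem.Chars.isIn pvPat l = true
  · simp [hg]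
  · simp only [Bool.not_eq_true] at hg
    rw [hg]
    simp only [Bool.false_or]
    by_cases hc : 2 ≤ PySem.Chars.count l ['-']
    · have h2 := count_two_isIn l hc
      simp [h2, hc]
    · simp [hc]

-- ===== VERDICT (by name: the statement is the Claim_ definition above) =====
theorem is_date_or_group_spec : Claim_equal_is_date_or_group := by
  intro value _
  unfold Spec_is_date_or_group is_date_or_group is_date_or_group_alt
  cases value with
  | none => rfl
  | some s =>
    simp only [PySem.Str.isIn_eq, PySem.Str.count_eq,
               show ("group" : String).toList = pvPat from rfl,
               show ("/" : String).toList = ['/'] from rfl,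
               show ("-" : String).toList = ['-'] from rfl,
               show (":" : String).toList = [':'] from rfl]
    exact core_chars (PySem.Str.lower s).toList
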